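-- pv_equiv track=rewrite | github.com/kim62210/cit | cit/core/context_diff.py | _describe_mcp_changes
-- ===== SOURCE A (Python) =====
-- from typing import Any
--
-- def _describe_mcp_changes(
--     current_mcp: dict[str, Any], target_mcp: dict[str, Any]
-- ) -> list[str]:
--     changes: list[str] = []
--     keys = sorted(set(current_mcp) | set(target_mcp))
--     for key in keys:
--         if key not in current_mcp:
--             changes.append(f"+ mcp.{key}")
--         elif key not in target_mcp:
--             changes.append(f"- mcp.{key}")
--         elif current_mcp[key] != target_mcp[key]:
--             changes.append(f"~ mcp.{key}")
--     return changes
-- ===== SOURCE B (Python) =====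
-- from typing import Any
--
-- def _describe_mcp_changes(
--     current_mcp: dict[str, Any], target_mcp: dict[str, Any]
-- ) -> list[str]:
--     # Two-pointer merge of the two key-sorted item lists: no sets, no
--     # membership tests — classification falls out of the key comparison.
--     cur = sorted(current_mcp.items(), key=lambda kv: kv[0])
--     tgt = sorted(target_mcp.items(), key=lambda kv: kv[0])
--     out: list[str] = []
--     i = j = 0
--     while i < len(cur) and j < len(tgt):
--         ck, cv = cur[i]
--         tk, tv = tgt[j]
--         if ck < tk:
--             out.append(f"- mcp.{ck}")
--             i += 1
--         elif tk < ck: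
--             out.append(f"+ mcp.{tk}")
--             j += 1
--         else:
--             if cv != tv:
--                 out.append(f"~ mcp.{ck}")
--             i += 1
--             j += 1
--     while i < len(cur):
--         out.append(f"- mcp.{cur[i][0]}")
--         i += 1
--     while j < len(tgt):
--         out.append(f"+ mcp.{tgt[j][0]}")
--         j += 1
--     return out
-- ===== Notes on version B (the rewrite author's own statement) =====
-- stated objective: alternative
-- what changed: B sorts the two item lists by key once and does a two-pointer merge, classifying each key as removed/added/changed from the key comparison alone, instead of A's iteration over the sorted union of key sets with per-key dict membership tests and lookups.
import Mathlib
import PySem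

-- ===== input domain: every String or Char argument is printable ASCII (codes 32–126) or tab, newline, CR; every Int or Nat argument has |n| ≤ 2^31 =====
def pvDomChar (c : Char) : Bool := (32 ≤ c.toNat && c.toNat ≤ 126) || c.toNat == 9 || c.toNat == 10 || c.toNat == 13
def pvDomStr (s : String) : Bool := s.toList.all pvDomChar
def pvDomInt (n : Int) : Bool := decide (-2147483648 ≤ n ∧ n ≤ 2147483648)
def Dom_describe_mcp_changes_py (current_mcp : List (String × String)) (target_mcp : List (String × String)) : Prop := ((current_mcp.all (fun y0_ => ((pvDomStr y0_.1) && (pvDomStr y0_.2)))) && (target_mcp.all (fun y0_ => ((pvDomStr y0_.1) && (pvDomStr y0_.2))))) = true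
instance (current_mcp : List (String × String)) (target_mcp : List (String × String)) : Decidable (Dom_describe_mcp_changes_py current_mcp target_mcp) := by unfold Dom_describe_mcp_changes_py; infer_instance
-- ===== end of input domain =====

-- B describes the dict diff by a two-pointer merge of the two key-sorted item lists (no set
-- objects, no per-key membership tests in the loop), instead of A's loop over the sorted union
-- of the two key sets with per-key containment tests and lookups.

-- ===== PORT A =====
-- keys = sorted(set(current_mcp) | set(target_mcp)); then the for-loop with its branch chain
def describe_mcp_changes_py (current_mcp : List (String × String)) (target_mcp : List (String × String)) : List String :=
  let keys := PySem.List.sorted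
      (PySem.Set.union (PySem.Set.ofList (current_mcp.map Prod.fst))
        (PySem.Set.ofList (target_mcp.map Prod.fst)))
      (fun k => k) false
  keys.foldl (fun changes key =>
    if (PySem.Dict.mk current_mcp).contains key = false then
      changes ++ ["+ mcp." ++ key]
    else if (PySem.Dict.mk target_mcp).contains key = false then
      changes ++ ["- mcp." ++ key]
    else if (PySem.Dict.mk current_mcp).get? key ≠ (PySem.Dict.mk target_mcp).get? key then
      changes ++ ["~ mcp." ++ key]
    else changes) []

-- ===== PORT B =====
-- the three while loops of Source B, as structural recursion on the two remaining suffixes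
def pvMergeDiff : List (String × String) → List (String × String) → List String
  | [], t => t.map (fun p => "+ mcp." ++ p.1)
  | c :: cs, [] => ("- mcp." ++ c.1) :: pvMergeDiff cs []
  | (ck, cv) :: cs, (tk, tv) :: ts =>
    if ck < tk then ("- mcp." ++ ck) :: pvMergeDiff cs ((tk, tv) :: ts)
    else if tk < ck then ("+ mcp." ++ tk) :: pvMergeDiff ((ck, cv) :: cs) ts
    else (if cv ≠ tv then ["~ mcp." ++ ck] else []) ++ pvMergeDiff cs ts
termination_by c t => c.length + t.length

def describe_mcp_changes_py_alt (current_mcp : List (String × String)) (target_mcp : List (String × String)) : List String :=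
  let cur := PySem.List.sorted current_mcp (fun kv => kv.1) false
  let tgt := PySem.List.sorted target_mcp (fun kv => kv.1) false
  pvMergeDiff cur tgt

-- ===== PRECONDITION & SPEC =====
-- Pre_ excludes association lists with duplicate keys: those do not represent a Python dict
-- (dict construction silently keeps only the last value), so A's behaviour there is not defined
-- by the source; both Pythons receive de-duplicated dicts.
def Pre_describe_mcp_changes_py (current_mcp : List (String × String)) (target_mcp : List (String × String)) : Prop :=
  (current_mcp.map Prod.fst).Nodup ∧ (target_mcp.map Prod.fst).Nodup
instance (current_mcp : List (String × String)) (target_mcp : List (String × String)) : Decidable (Pre_describe_mcp_changes_py current_mcp target_mcp) := by unfold Pre_describe_mcp_changes_py; infer_instance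

def pvWitness_describe_mcp_changes_py : (List (String × String)) × (List (String × String)) :=
  ([("a", "1"), ("b", "2")], [("b", "3"), ("c", "2")])

def Spec_describe_mcp_changes_py (current_mcp : List (String × String)) (target_mcp : List (String × String)) (out : List String) : Prop := out = describe_mcp_changes_py_alt current_mcp target_mcp
instance (current_mcp : List (String × String)) (target_mcp : List (String × String)) (out : List String) : Decidable (Spec_describe_mcp_changes_py current_mcp target_mcp out) := by unfold Spec_describe_mcp_changes_py; infer_instance

-- ===== CLAIM (what is proved, stated in full; the proofs are below) =====
def Claim_equal_describe_mcp_changes_py : Prop := ∀ (current_mcp : List (String × String)) (target_mcp : List (String × String)), Dom_describe_mcp_changes_py current_mcp target_mcp → Pre_describe_mcp_changes_py current_mcp target_mcp → Spec_describe_mcp_changes_py current_mcp target_mcp (describe_mcp_changes_py current_mcp target_mcp)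

-- ===== LEMMAS AND PROOFS =====

-- The line A emits for a key (none = no line), parametric in the two association lists.
def pvLine (c t : List (String × String)) (k : String) : Option String :=
  if (PySem.Dict.mk c).contains k = false then some ("+ mcp." ++ k)
  else if (PySem.Dict.mk t).contains k = false then some ("- mcp." ++ k)
  else if (PySem.Dict.mk c).get? k ≠ (PySem.Dict.mk t).get? k then some ("~ mcp." ++ k)
  else none

def pvKMerge : List String → List String → List String
  | [], ys => ys
  | x :: xs, [] => x :: pvKMerge xs []
  | x :: xs, y :: ys =>
    if x < y then x :: pvKMerge xs (y :: ys)
    else if y < x then y :: pvKMerge (x :: xs) ys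
    else x :: pvKMerge xs ys
termination_by a b => a.length + b.length

lemma mem_pvKMerge (xs ys : List String) (k : String) :
    k ∈ pvKMerge xs ys ↔ k ∈ xs ∨ k ∈ ys := by
  induction xs, ys using pvKMerge.induct with
  | case1 ys => simp [pvKMerge]
  | case2 x xs ih => simp [pvKMerge, ih]
  | case3 x xs y ys h ih => simp [pvKMerge, h, ih]; tauto
  | case4 x xs y ys h h' ih => simp [pvKMerge, h, h', ih]; tauto
  | case5 x xs y ys h h' ih =>
    have hxy : x = y := le_antisymm (not_lt.mp h') (not_lt.mp h)
    simp [pvKMerge, h, h', ih, hxy]; tauto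

lemma pairwise_pvKMerge (xs ys : List String)
    (hx : xs.Pairwise (· < ·)) (hy : ys.Pairwise (· < ·)) :
    (pvKMerge xs ys).Pairwise (· < ·) := by
  induction xs, ys using pvKMerge.induct with
  | case1 ys => simpa [pvKMerge] using hy
  | case2 x xs ih =>
    rw [pvKMerge, List.pairwise_cons]
    rcases List.pairwise_cons.mp hx with ⟨hb, hx'⟩
    exact ⟨fun k hk => hb k (by simpa [mem_pvKMerge] using hk), ih hx' hy⟩
  | case3 x xs y ys h ih =>
    rcases List.pairwise_cons.mp hx with ⟨hbx, hx'⟩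
    rcases List.pairwise_cons.mp hy with ⟨hby, hy'⟩
    rw [pvKMerge, if_pos h, List.pairwise_cons]
    refine ⟨fun k hk => ?_, ih hx' hy⟩
    rcases (mem_pvKMerge _ _ _).mp hk with hk | hk
    · exact hbx k hk
    · rcases List.mem_cons.mp hk with rfl | hk
      · exact h
      · exact lt_trans h (hby k hk)
  | case4 x xs y ys h h' ih =>
    rcases List.pairwise_cons.mp hx with ⟨hbx, hx'⟩
    rcases List.pairwise_cons.mp hy with ⟨hby, hy'⟩
    rw [pvKMerge, if_neg h, if_pos h', List.pairwise_cons]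
    refine ⟨fun k hk => ?_, ih hx hy'⟩
    rcases (mem_pvKMerge _ _ _).mp hk with hk | hk
    · rcases List.mem_cons.mp hk with rfl | hk
      · exact h'
      · exact lt_trans h' (hbx k hk)
    · exact hby k hk
  | case5 x xs y ys h h' ih =>
    have hxy : x = y := le_antisymm (not_lt.mp h') (not_lt.mp h)
    rcases List.pairwise_cons.mp hx with ⟨hbx, hx'⟩
    rcases List.pairwise_cons.mp hy with ⟨hby, hy'⟩
    rw [pvKMerge, if_neg h, if_neg h', List.pairwise_cons]
    refine ⟨fun k hk => ?_, ih hx' hy'⟩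
    rcases (mem_pvKMerge _ _ _).mp hk with hk | hk
    · exact hbx k hk
    · exact hxy ▸ hby k hk

lemma pv_contains_false (l : List (String × String)) (k : String) (h : k ∉ l.map Prod.fst) :
    (PySem.Dict.mk l).contains k = false := by
  rw [PySem.Dict.contains_eq_decide_mem_keys]
  simp [PySem.Dict.keys_mk, h]

lemma pv_contains_true (l : List (String × String)) (k : String) (h : k ∈ l.map Prod.fst) :
    (PySem.Dict.mk l).contains k = true := by
  rw [PySem.Dict.contains_eq_decide_mem_keys]
  simp [PySem.Dict.keys_mk, h]

lemma pv_contains_cons (ck cv : String) (cs : List (String × String)) (k : String) (h : k ≠ ck) :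
    (PySem.Dict.mk ((ck, cv) :: cs)).contains k = (PySem.Dict.mk cs).contains k := by
  rw [PySem.Dict.contains_eq_decide_mem_keys, PySem.Dict.contains_eq_decide_mem_keys]
  simp [PySem.Dict.keys_mk, h]

lemma pv_get?_cons (ck cv : String) (cs : List (String × String)) (k : String) (h : k ≠ ck) :
    (PySem.Dict.mk ((ck, cv) :: cs)).get? k = (PySem.Dict.mk cs).get? k := by
  rw [PySem.Dict.get?_mk_cons]
  simp [Ne.symm h]

lemma pvLine_cons_left (ck cv : String) (cs t : List (String × String)) (k : String) (h : k ≠ ck) :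
    pvLine ((ck, cv) :: cs) t k = pvLine cs t k := by
  simp only [pvLine, pv_contains_cons ck cv cs k h, pv_get?_cons ck cv cs k h]

lemma pvLine_cons_right (tk tv : String) (c ts : List (String × String)) (k : String) (h : k ≠ tk) :
    pvLine c ((tk, tv) :: ts) k = pvLine c ts k := by
  simp only [pvLine, pv_contains_cons tk tv ts k h, pv_get?_cons tk tv ts k h]

lemma pvMergeDiff_eq (c t : List (String × String))
    (hc : (c.map Prod.fst).Pairwise (· < ·)) (ht : (t.map Prod.fst).Pairwise (· < ·)) :
    pvMergeDiff c t = (pvKMerge (c.map Prod.fst) (t.map Prod.fst)).filterMap (pvLine c t) := by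
  induction c, t using pvMergeDiff.induct with
  | case1 t =>
    have hl : ∀ k, pvLine [] t k = some ("+ mcp." ++ k) := by
      intro k
      simp [pvLine, pv_contains_false [] k (by simp)]
    simp [pvMergeDiff, pvKMerge, List.filterMap_map, Function.comp_def, hl]
  | case2 c0 cs ih =>
    simp only [List.map_cons, List.map_nil] at hc ht ⊢
    rcases List.pairwise_cons.mp hc with ⟨hb, hc'⟩
    have hhd : pvLine (c0 :: cs) [] c0.1 = some ("- mcp." ++ c0.1) := by
      simp [pvLine, pv_contains_true (c0 :: cs) c0.1 (by simp), pv_contains_false [] c0.1 (by simp)]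
    have htl : ∀ k ∈ pvKMerge (cs.map Prod.fst) ([] : List String),
        pvLine (c0 :: cs) [] k = pvLine cs [] k := by
      intro k hk
      rcases (mem_pvKMerge _ _ _).mp hk with hk | hk
      · exact pvLine_cons_left c0.1 c0.2 cs [] k (ne_of_gt (hb k hk))
      · simp at hk
    have hih := ih hc' (by simp)
    simp only [List.map_nil] at hih
    rw [pvKMerge, List.filterMap_cons, hhd, List.filterMap_congr htl, pvMergeDiff, hih]
  | case3 ck cv cs tk tv ts h ih =>
    simp only [List.map_cons] at hc ht ⊢
    rcases List.pairwise_cons.mp hc with ⟨hbc, hc'⟩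
    rcases List.pairwise_cons.mp ht with ⟨hbt, ht'⟩
    have hhd : pvLine ((ck, cv) :: cs) ((tk, tv) :: ts) ck = some ("- mcp." ++ ck) := by
      have hnt : ck ∉ ((tk, tv) :: ts).map Prod.fst := by
        simp only [List.map_cons, List.mem_cons]
        rintro (rfl | hm)
        · exact absurd h (lt_irrefl _)
        · exact absurd (lt_trans h (hbt ck hm)) (lt_irrefl _)
      simp [pvLine, pv_contains_true ((ck, cv) :: cs) ck (by simp), pv_contains_false _ _ hnt]
    have htl : ∀ k ∈ pvKMerge (cs.map Prod.fst) (tk :: ts.map Prod.fst),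
        pvLine ((ck, cv) :: cs) ((tk, tv) :: ts) k = pvLine cs ((tk, tv) :: ts) k := by
      intro k hk
      rcases (mem_pvKMerge _ _ _).mp hk with hk | hk
      · exact pvLine_cons_left ck cv cs _ k (ne_of_gt (hbc k hk))
      · rcases List.mem_cons.mp hk with rfl | hm
        · exact pvLine_cons_left ck cv cs _ k (ne_of_gt h)
        · exact pvLine_cons_left ck cv cs _ k (ne_of_gt (lt_trans h (hbt k hm)))
    have hih := ih hc' ht
    simp only [List.map_cons] at hih
    rw [pvKMerge, if_pos h, List.filterMap_cons, hhd, List.filterMap_congr htl,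
      pvMergeDiff, if_pos h, hih]
  | case4 ck cv cs tk tv ts h h' ih =>
    simp only [List.map_cons] at hc ht ⊢
    rcases List.pairwise_cons.mp hc with ⟨hbc, hc'⟩
    rcases List.pairwise_cons.mp ht with ⟨hbt, ht'⟩
    have hhd : pvLine ((ck, cv) :: cs) ((tk, tv) :: ts) tk = some ("+ mcp." ++ tk) := by
      have hnc : tk ∉ ((ck, cv) :: cs).map Prod.fst := by
        simp only [List.map_cons, List.mem_cons]
        rintro (rfl | hm)
        · exact absurd h' (lt_irrefl _)
        · exact absurd (lt_trans h' (hbc tk hm)) (lt_irrefl _)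
      simp [pvLine, pv_contains_false _ _ hnc]
    have htl : ∀ k ∈ pvKMerge (ck :: cs.map Prod.fst) (ts.map Prod.fst),
        pvLine ((ck, cv) :: cs) ((tk, tv) :: ts) k = pvLine ((ck, cv) :: cs) ts k := by
      intro k hk
      rcases (mem_pvKMerge _ _ _).mp hk with hk | hk
      · rcases List.mem_cons.mp hk with rfl | hm
        · exact pvLine_cons_right tk tv _ ts k (ne_of_gt h')
        · exact pvLine_cons_right tk tv _ ts k (ne_of_gt (lt_trans h' (hbc k hm)))
      · exact pvLine_cons_right tk tv _ ts k (ne_of_gt (hbt k hk))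
    have hih := ih hc ht'
    simp only [List.map_cons] at hih
    rw [pvKMerge, if_neg h, if_pos h', List.filterMap_cons, hhd, List.filterMap_congr htl,
      pvMergeDiff, if_neg h, if_pos h', hih]
  | case5 ck cv cs tk tv ts h h' ih =>
    have hkt : ck = tk := le_antisymm (not_lt.mp h') (not_lt.mp h)
    subst hkt
    simp only [List.map_cons] at hc ht ⊢
    rcases List.pairwise_cons.mp hc with ⟨hbc, hc'⟩
    rcases List.pairwise_cons.mp ht with ⟨hbt, ht'⟩
    have hgc : (PySem.Dict.mk ((ck, cv) :: cs)).get? ck = some cv := by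
      rw [PySem.Dict.get?_mk_cons]; simp
    have hgt : (PySem.Dict.mk ((ck, tv) :: ts)).get? ck = some tv := by
      rw [PySem.Dict.get?_mk_cons]; simp
    have hhd : pvLine ((ck, cv) :: cs) ((ck, tv) :: ts) ck =
        if cv ≠ tv then some ("~ mcp." ++ ck) else none := by
      by_cases hv : cv = tv
      · subst hv
        simp [pvLine, pv_contains_true ((ck, cv) :: cs) ck (by simp),
          pv_contains_true ((ck, cv) :: ts) ck (by simp), hgc, hgt]
      · simp [pvLine, pv_contains_true ((ck, cv) :: cs) ck (by simp),
          pv_contains_true ((ck, tv) :: ts) ck (by simp), hgc, hgt, hv]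
    have htl : ∀ k ∈ pvKMerge (cs.map Prod.fst) (ts.map Prod.fst),
        pvLine ((ck, cv) :: cs) ((ck, tv) :: ts) k = pvLine cs ts k := by
      intro k hk
      have hne : k ≠ ck := by
        rcases (mem_pvKMerge _ _ _).mp hk with hk | hk
        · exact ne_of_gt (hbc k hk)
        · exact ne_of_gt (hbt k hk)
      rw [pvLine_cons_left ck cv cs _ k hne, pvLine_cons_right ck tv cs ts k hne]
    have hih := ih hc' ht'
    rw [pvKMerge, if_neg h, if_neg h', List.filterMap_cons, hhd, List.filterMap_congr htl,
      pvMergeDiff, if_neg h, if_neg h', hih]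
    by_cases hv : cv = tv <;> simp [hv]

lemma pv_get?_perm (c l : List (String × String)) (h : c.Perm l)
    (hl : (l.map Prod.fst).Nodup) (k : String) :
    (PySem.Dict.mk c).get? k = (PySem.Dict.mk l).get? k := by
  have hcnd : (c.map Prod.fst).Nodup := ((h.map Prod.fst).nodup_iff).mpr hl
  by_cases hm : k ∈ l.map Prod.fst
  · rcases List.mem_map.mp hm with ⟨⟨k', v⟩, hpl, hk⟩
    cases hk
    have h1 : (PySem.Dict.mk l).get? k' = some v :=
      PySem.Dict.get?_of_mem_items (d := PySem.Dict.mk l)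
        (show (k', v) ∈ (PySem.Dict.mk l).items from hpl)
        (by simpa [PySem.Dict.keys_mk] using hl)
    have h2 : (PySem.Dict.mk c).get? k' = some v :=
      PySem.Dict.get?_of_mem_items (d := PySem.Dict.mk c)
        (show (k', v) ∈ (PySem.Dict.mk c).items from h.mem_iff.mpr hpl)
        (by simpa [PySem.Dict.keys_mk] using hcnd)
    rw [h1, h2]
  · have h1 : (PySem.Dict.mk l).get? k = none := by
      rw [PySem.Dict.get?_eq_none_iff_not_mem_keys]
      simpa [PySem.Dict.keys_mk] using hm
    have h2 : (PySem.Dict.mk c).get? k = none := by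
      rw [PySem.Dict.get?_eq_none_iff_not_mem_keys]
      simp only [PySem.Dict.keys_mk]
      intro hcm
      exact hm ((h.map Prod.fst).mem_iff.mp hcm)
    rw [h1, h2]

lemma pv_contains_perm (c l : List (String × String)) (h : c.Perm l) (k : String) :
    (PySem.Dict.mk c).contains k = (PySem.Dict.mk l).contains k := by
  rw [PySem.Dict.contains_eq_decide_mem_keys, PySem.Dict.contains_eq_decide_mem_keys]
  simp only [PySem.Dict.keys_mk]
  exact decide_eq_decide.mpr (h.map Prod.fst).mem_iff

lemma pvLine_perm (c l t m : List (String × String))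
    (hc : c.Perm l) (hl : (l.map Prod.fst).Nodup)
    (ht : t.Perm m) (hm : (m.map Prod.fst).Nodup) (k : String) :
    pvLine c t k = pvLine l m k := by
  simp only [pvLine, pv_contains_perm c l hc k, pv_contains_perm t m ht k,
    pv_get?_perm c l hc hl k, pv_get?_perm t m ht hm k]

lemma foldl_eq_filterMap (current_mcp target_mcp : List (String × String)) (K acc : List String) :
    K.foldl (fun changes key =>
      if (PySem.Dict.mk current_mcp).contains key = false then changes ++ ["+ mcp." ++ key]
      else if (PySem.Dict.mk target_mcp).contains key = false then changes ++ ["- mcp." ++ key]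
      else if (PySem.Dict.mk current_mcp).get? key ≠ (PySem.Dict.mk target_mcp).get? key then changes ++ ["~ mcp." ++ key]
      else changes) acc
    = acc ++ K.filterMap (pvLine current_mcp target_mcp) := by
  induction K generalizing acc with
  | nil => simp
  | cons k K ih =>
    simp only [List.foldl_cons]
    split_ifs with h1 h2 h3
    · have hpl : pvLine current_mcp target_mcp k = some ("+ mcp." ++ k) := by
        unfold pvLine; rw [if_pos h1]
      rw [ih, List.filterMap_cons]; simp [hpl]
    · have hpl : pvLine current_mcp target_mcp k = some ("- mcp." ++ k) := by
        unfold pvLine; rw [if_neg h1, if_pos h2]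
      rw [ih, List.filterMap_cons]; simp [hpl]
    · have hpl : pvLine current_mcp target_mcp k = some ("~ mcp." ++ k) := by
        unfold pvLine; rw [if_neg h1, if_neg h2, if_pos h3]
      rw [ih, List.filterMap_cons]; simp [hpl]
    · have hpl : pvLine current_mcp target_mcp k = none := by
        unfold pvLine; rw [if_neg h1, if_neg h2, if_neg h3]
      rw [ih, List.filterMap_cons]; simp [hpl]

theorem pv_main (current_mcp target_mcp : List (String × String))
    (h1 : (current_mcp.map Prod.fst).Nodup) (h2 : (target_mcp.map Prod.fst).Nodup) :
    describe_mcp_changes_py current_mcp target_mcp = describe_mcp_changes_py_alt current_mcp target_mcp := by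
  unfold describe_mcp_changes_py describe_mcp_changes_py_alt
  set c := PySem.List.sorted current_mcp (fun kv => kv.1) false with hcdef
  set t := PySem.List.sorted target_mcp (fun kv => kv.1) false with htdef
  set U := PySem.Set.union (PySem.Set.ofList (current_mcp.map Prod.fst))
      (PySem.Set.ofList (target_mcp.map Prod.fst)) with hUdef
  have hcp : c.Perm current_mcp := PySem.List.sorted_perm _ _ _
  have htp : t.Perm target_mcp := PySem.List.sorted_perm _ _ _
  have hcnd : (c.map Prod.fst).Nodup := (hcp.map Prod.fst).nodup_iff.mpr h1
  have htnd : (t.map Prod.fst).Nodup := (htp.map Prod.fst).nodup_iff.mpr h2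
  have hcle : (c.map Prod.fst).Pairwise (· ≤ ·) := by
    rw [List.pairwise_map]
    exact PySem.List.sorted_pairwise current_mcp (fun kv => kv.1)
  have htle : (t.map Prod.fst).Pairwise (· ≤ ·) := by
    rw [List.pairwise_map]
    exact PySem.List.sorted_pairwise target_mcp (fun kv => kv.1)
  have hclt : (c.map Prod.fst).Pairwise (· < ·) :=
    (hcle.and hcnd).imp fun h => lt_of_le_of_ne h.1 h.2
  have htlt : (t.map Prod.fst).Pairwise (· < ·) :=
    (htle.and htnd).imp fun h => lt_of_le_of_ne h.1 h.2
  have hM : (pvKMerge (c.map Prod.fst) (t.map Prod.fst)).Pairwise (· < ·) :=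
    pairwise_pvKMerge _ _ hclt htlt
  have hMnd : (pvKMerge (c.map Prod.fst) (t.map Prod.fst)).Nodup := hM.imp ne_of_lt
  have hUnd : U.Nodup := PySem.Set.nodup_union _ _ (PySem.Set.nodup_ofList _)
  have hmem : ∀ k, k ∈ pvKMerge (c.map Prod.fst) (t.map Prod.fst) ↔ k ∈ U := by
    intro k
    rw [mem_pvKMerge, hUdef, PySem.Set.mem_union, PySem.Set.mem_ofList, PySem.Set.mem_ofList,
      (hcp.map Prod.fst).mem_iff, (htp.map Prod.fst).mem_iff]
  have hperm : (pvKMerge (c.map Prod.fst) (t.map Prod.fst)).Perm U :=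
    (List.perm_ext_iff_of_nodup hMnd hUnd).mpr hmem
  have hK : PySem.List.sorted U (fun k => k) false = pvKMerge (c.map Prod.fst) (t.map Prod.fst) :=
    PySem.List.sorted_eq_of_perm_of_pairwise_lt _ _ _ hperm hM
  have hline : pvLine c t = pvLine current_mcp target_mcp :=
    funext (pvLine_perm c current_mcp t target_mcp hcp h1 htp h2)
  rw [foldl_eq_filterMap, List.nil_append, hK, pvMergeDiff_eq c t hclt htlt, hline]

-- ===== VERDICT (by name: the statement is the Claim_ definition above) =====
theorem describe_mcp_changes_py_spec : Claim_equal_describe_mcp_changes_py := by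
  intro current_mcp target_mcp _ hpre
  unfold Spec_describe_mcp_changes_py
  exact pv_main current_mcp target_mcp hpre.1 hpre.2
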